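-- pv_equiv track=rewrite | github.com/Oralbaev/nonogram-solver | src/parser.py | _runs_to_midpoints
-- ===== SOURCE A (Python) =====
-- def _runs_to_midpoints(flags: list[bool]) -> list[int]:
--     """Convert a boolean list to a list of midpoints of True-runs."""
--     midpoints: list[int] = []
--     in_run = False
--     run_start = 0
--     for i, flag in enumerate(flags):
--         if flag and not in_run:
--             in_run = True
--             run_start = i
--         elif not flag and in_run:
--             in_run = False
--             midpoints.append((run_start + i - 1) // 2)
--     if in_run:
--         midpoints.append((run_start + len(flags) - 1) // 2)
--     return midpoints
-- ===== SOURCE B (Python) =====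
-- def _runs_to_midpoints(flags: list[bool]) -> list[int]:
--     """Convert a boolean list to a list of midpoints of True-runs."""
--     midpoints: list[int] = []
--     i = 0
--     n = len(flags)
--     while i < n:
--         if flags[i]:
--             j = i
--             while j < n and flags[j]:
--                 j += 1
--             midpoints.append((i + j - 1) // 2)
--             i = j
--         else:
--             i += 1
--     return midpoints
-- ===== Notes on version B (the rewrite author's own statement) =====
-- stated objective: alternative
-- what changed: Replaced the in_run/run_start state machine with post-loop flush by an index-skipping scanner: on seeing True it advances an inner cursor to the end of the run, emits the midpoint immediately, and jumps past the run, so no boolean state or trailing-run flush exists.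
import Mathlib
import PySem

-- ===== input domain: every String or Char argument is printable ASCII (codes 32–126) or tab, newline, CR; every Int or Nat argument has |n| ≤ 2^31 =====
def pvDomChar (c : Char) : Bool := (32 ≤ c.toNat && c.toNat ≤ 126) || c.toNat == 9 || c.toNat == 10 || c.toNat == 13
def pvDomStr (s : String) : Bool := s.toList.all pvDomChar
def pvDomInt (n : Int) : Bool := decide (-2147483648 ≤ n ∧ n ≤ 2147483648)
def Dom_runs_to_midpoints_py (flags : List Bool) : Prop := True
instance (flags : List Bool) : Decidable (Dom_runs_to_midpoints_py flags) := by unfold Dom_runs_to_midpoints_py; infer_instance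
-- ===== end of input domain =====

-- B replaces A's in_run/run_start state machine (with its post-loop flush) by an
-- index-skipping scanner that consumes each True-run in an inner pass; same O(n) cost.

-- ===== PORT A =====
-- one loop step of A: state = (midpoints, in_run, run_start), element = (i, flag)
def aStep (st : List Int × Bool × Int) (p : Int × Bool) : List Int × Bool × Int :=
  if p.2 && !st.2.1 then (st.1, true, p.1)
  else if !p.2 && st.2.1 then
    (st.1 ++ [PySem.Int.floordiv (st.2.2 + p.1 - 1) 2], false, st.2.2)
  else st

def runs_to_midpoints_py (flags : List Bool) : List Int :=
  let st := (PySem.List.enumerate flags 0).foldl aStep ([], false, 0)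
  if st.2.1 then st.1 ++ [PySem.Int.floordiv (st.2.2 + (flags.length : Int) - 1) 2]
  else st.1

-- ===== PORT B =====
-- inner while: length of the leading True-run
def altRunLen : List Bool → Nat
  | true :: rest => altRunLen rest + 1
  | _ => 0

-- outer while over the remaining list, i = index of its head
def altGo : List Bool → Int → List Int
  | [], _ => []
  | false :: rest, i => altGo rest (i + 1)
  | true :: rest, i =>
      let k : Nat := altRunLen rest + 1
      PySem.Int.floordiv (i + (i + (k : Int)) - 1) 2 :: altGo ((true :: rest).drop k) (i + (k : Int))
termination_by l => l.length
decreasing_by all_goals simp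

def runs_to_midpoints_py_alt (flags : List Bool) : List Int := altGo flags 0

-- ===== PRECONDITION & SPEC =====
def Spec_runs_to_midpoints_py (flags : List Bool) (out : List Int) : Prop := out = runs_to_midpoints_py_alt flags
instance (flags : List Bool) (out : List Int) : Decidable (Spec_runs_to_midpoints_py flags out) := by unfold Spec_runs_to_midpoints_py; infer_instance

-- ===== CLAIM (what is proved, stated in full; the proofs are below) =====
def Claim_equal_runs_to_midpoints_py : Prop := ∀ (flags : List Bool), Dom_runs_to_midpoints_py flags → Spec_runs_to_midpoints_py flags (runs_to_midpoints_py flags)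

-- ===== LEMMAS AND PROOFS =====

-- A's final flush, with n = len(flags)
def aFlush (n : Int) (st : List Int × Bool × Int) : List Int :=
  if st.2.1 then st.1 ++ [PySem.Int.floordiv (st.2.2 + n - 1) 2] else st.1

theorem altGo_nil (i : Int) : altGo [] i = [] := by simp [altGo]

theorem altGo_false (rest : List Bool) (i : Int) : altGo (false :: rest) i = altGo rest (i + 1) := by
  simp [altGo]

theorem altGo_true (rest : List Bool) (i : Int) :
    altGo (true :: rest) i =
      PySem.Int.floordiv (i + (i + ((altRunLen rest + 1 : Nat) : Int)) - 1) 2 ::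
        altGo (rest.drop (altRunLen rest)) (i + ((altRunLen rest + 1 : Nat) : Int)) := by
  rw [altGo]; simp

-- the invariant of A's loop, both states at once
theorem key (l : List Bool) : ∀ (i : Int) (acc : List Int) (rs : Int),
    (aFlush (i + l.length) ((PySem.List.enumerate l i).foldl aStep (acc, false, rs)) =
      acc ++ altGo l i)
    ∧ (aFlush (i + l.length) ((PySem.List.enumerate l i).foldl aStep (acc, true, rs)) =
      acc ++ PySem.Int.floordiv (rs + (i + (altRunLen l : Int)) - 1) 2 ::
        altGo (l.drop (altRunLen l)) (i + (altRunLen l : Int))) := by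
  induction l with
  | nil =>
      intro i acc rs
      simp [PySem.List.enumerate_nil, aFlush, altRunLen, altGo_nil]
  | cons b rest ih =>
      intro i acc rs
      cases b
      · -- head is false
        constructor
        · rw [PySem.List.enumerate_cons, List.foldl_cons]
          have h := (ih (i + 1) acc rs).1
          simp only [aStep, List.length_cons, altGo_false]
          push_cast
          rw [show i + ((rest.length : Int) + 1) = i + 1 + (rest.length : Int) from by ring]
          simpa using h
        · rw [PySem.List.enumerate_cons, List.foldl_cons]
          have h := (ih (i + 1) (acc ++ [PySem.Int.floordiv (rs + i - 1) 2]) rs).1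
          simp only [aStep, List.length_cons, altRunLen, List.drop_zero]
          push_cast
          rw [show i + ((rest.length : Int) + 1) = i + 1 + (rest.length : Int) from by ring,
              show rs + (i + (0 : Int)) - 1 = rs + i - 1 from by ring,
              show i + (0 : Int) = i from by ring, altGo_false]
          simpa [List.append_assoc] using h
      · -- head is true
        constructor
        · rw [PySem.List.enumerate_cons, List.foldl_cons]
          have h := (ih (i + 1) acc i).2
          simp only [aStep, List.length_cons]
          rw [altGo_true]
          push_cast
          rw [show i + ((rest.length : Int) + 1) = i + 1 + (rest.length : Int) from by ring,
              show i + (i + ((altRunLen rest : Int) + 1)) - 1 = i + (i + 1 + (altRunLen rest : Int)) - 1 from by ring,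
              show i + ((altRunLen rest : Int) + 1) = i + 1 + (altRunLen rest : Int) from by ring]
          simpa using h
        · rw [PySem.List.enumerate_cons, List.foldl_cons]
          have h := (ih (i + 1) acc rs).2
          simp only [aStep, List.length_cons, altRunLen, List.drop_succ_cons]
          push_cast
          rw [show i + ((rest.length : Int) + 1) = i + 1 + (rest.length : Int) from by ring,
              show rs + (i + ((altRunLen rest : Int) + 1)) - 1 = rs + (i + 1 + (altRunLen rest : Int)) - 1 from by ring,
              show i + ((altRunLen rest : Int) + 1) = i + 1 + (altRunLen rest : Int) from by ring]
          simpa using h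

-- ===== VERDICT (by name: the statement is the Claim_ definition above) =====
theorem runs_to_midpoints_py_spec : Claim_equal_runs_to_midpoints_py := by
  intro flags _
  unfold Spec_runs_to_midpoints_py runs_to_midpoints_py runs_to_midpoints_py_alt
  have h := (key flags 0 [] 0).1
  simp only [aFlush, zero_add] at h
  simpa using h
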